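-- pv_equiv track=rewrite | github.com/shel-don254/codility | solution.py | solution
-- ===== SOURCE A (Python) =====
-- def solution(R):
--     max_pothole_indicator = 0
--     current_group_depth = 0
--     current_group_size = 0
--     for segment in R:
--         if segment == 0:
--             max_pothole_indicator = max(max_pothole_indicator, current_group_depth * current_group_size)
--             current_group_depth = 0
--             current_group_size = 0
--         else:
--
--             current_group_depth = max(current_group_depth, segment)
--             current_group_size += 1
--
--
--     max_pothole_indicator = max(max_pothole_indicator, current_group_depth * current_group_size)
--     return max_pothole_indicator
-- ===== SOURCE B (Python) =====
-- def solution(R):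
--     groups = []
--     cur = []
--     for x in R:
--         if x == 0:
--             groups.append(cur)
--             cur = []
--         else:
--             cur.append(x)
--     groups.append(cur)
--     return max([0] + [max(0, max(g)) * len(g) for g in groups if g])
-- ===== Notes on version B (the rewrite author's own statement) =====
-- stated objective: simpler
-- what changed: B first splits R into zero-delimited groups, then computes the answer as a separate reduction max(0, max over nonempty groups of max(0,max(g))*len(g)) using builtin max/len over whole groups, replacing A's interleaved per-element flush-on-zero accumulator loop.
import Mathlib
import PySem

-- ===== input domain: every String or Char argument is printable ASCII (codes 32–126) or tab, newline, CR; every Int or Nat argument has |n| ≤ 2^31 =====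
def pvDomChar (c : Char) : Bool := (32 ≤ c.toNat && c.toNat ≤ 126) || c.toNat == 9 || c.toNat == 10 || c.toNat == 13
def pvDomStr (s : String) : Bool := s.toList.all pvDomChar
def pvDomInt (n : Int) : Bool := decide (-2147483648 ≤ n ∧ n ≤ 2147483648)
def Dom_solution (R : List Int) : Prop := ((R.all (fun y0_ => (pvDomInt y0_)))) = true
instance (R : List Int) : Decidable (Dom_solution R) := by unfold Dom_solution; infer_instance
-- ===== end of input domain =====

-- B splits R into zero-delimited groups first, then reduces max(0, max(g))*len(g) over the
-- nonempty groups — a build-then-reduce decomposition of A's interleaved accumulator loop (objective: simpler).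


-- ===== PORT A =====
-- A's loop state: (max_pothole_indicator, current_group_depth, current_group_size)
def solutionStep (st : Int × Int × Int) (segment : Int) : Int × Int × Int :=
  if segment == 0 then (max st.1 (st.2.1 * st.2.2), 0, 0)
  else (st.1, max st.2.1 segment, st.2.2 + 1)

def solution (R : List Int) : Int :=
  let st := R.foldl solutionStep (0, 0, 0)
  max st.1 (st.2.1 * st.2.2)

-- ===== PORT B =====
-- group-building loop of Source B: state (groups, cur)
def altStep (st : List (List Int) × List Int) (x : Int) : List (List Int) × List Int :=
  if x == 0 then (st.1 ++ [st.2], []) else (st.1, st.2 ++ [x])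

-- max(0, max(g)) * len(g) for a nonempty group g (Python max of a nonempty list = fold from its head)
def altVal (g : List Int) : Int :=
  match g with
  | [] => 0
  | h :: t => max 0 (t.foldl max h) * (h :: t).length

def solution_alt (R : List Int) : Int :=
  let st := R.foldl altStep ([], [])
  let groups := st.1 ++ [st.2]
  ((groups.filter (fun g => !(g == []))).map altVal).foldl max 0

-- ===== PRECONDITION & SPEC =====
def Spec_solution (R : List Int) (out : Int) : Prop := out = solution_alt R
instance (R : List Int) (out : Int) : Decidable (Spec_solution R out) := by unfold Spec_solution; infer_instance

-- ===== CLAIM (what is proved, stated in full; the proofs are below) =====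
def Claim_equal_solution : Prop := ∀ (R : List Int), Dom_solution R → Spec_solution R (solution R)

-- ===== LEMMAS AND PROOFS =====

-- contribution of a group, in A's terms
def gval (g : List Int) : Int := (g.foldl max 0) * g.length

-- reduction of a group list, in A's terms
def gmax (gs : List (List Int)) (a : Int) : Int := gs.foldl (fun acc g => max acc (gval g)) a

theorem foldl_max_comm (t : List Int) : ∀ a b : Int, t.foldl max (max a b) = max a (t.foldl max b) := by
  induction t with
  | nil => intro a b; simp
  | cons c t ih =>
    intro a b
    simp only [List.foldl_cons]
    rw [max_assoc, ih]

theorem altVal_eq_gval (g : List Int) : altVal g = gval g := by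
  cases g with
  | nil => simp [altVal, gval]
  | cons h t =>
    simp only [altVal, gval, List.foldl_cons]
    rw [foldl_max_comm t 0 h]

-- the filtered/mapped reduction of the port equals gmax, for a nonnegative seed
theorem filter_map_fold (gs : List (List Int)) : ∀ a : Int, 0 ≤ a →
    ((gs.filter (fun g => !(g == []))).map altVal).foldl max a = gmax gs a := by
  induction gs with
  | nil => intro a _; simp [gmax]
  | cons g gs ih =>
    intro a ha
    cases g with
    | nil =>
      simpa [gmax, gval, List.foldl_cons, max_eq_left ha] using ih a ha
    | cons h t =>
      simp only [List.filter_cons, gmax]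
      rw [if_pos (by simp), List.map_cons, List.foldl_cons, altVal_eq_gval]
      simpa [gmax] using ih (max a (gval (h :: t))) (le_trans ha (le_max_left _ _))

-- appending the trailing group
theorem gmax_append (gs : List (List Int)) (g : List Int) (a : Int) :
    gmax (gs ++ [g]) a = max (gmax gs a) (gval g) := by
  simp [gmax, List.foldl_append]

-- the common recursion both loops compute
def spec : List Int → Int → Int → Int → Int
  | [], m, d, s => max m (d * s)
  | x :: R, m, d, s => if x = 0 then spec R (max m (d * s)) 0 0 else spec R m (max d x) (s + 1)

theorem A_eq_spec (R : List Int) : ∀ m d s : Int,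
    (let st := R.foldl solutionStep (m, d, s); max st.1 (st.2.1 * st.2.2)) = spec R m d s := by
  induction R with
  | nil => intro m d s; simp [spec]
  | cons x R ih =>
    intro m d s
    simp only [List.foldl_cons, solutionStep, spec]
    by_cases hx : x = 0 <;> simp [hx, ih]

theorem B_eq_spec (R : List Int) : ∀ (gs : List (List Int)) (cur : List Int) (a : Int),
    gmax ((R.foldl altStep (gs, cur)).1 ++ [(R.foldl altStep (gs, cur)).2]) a
      = spec R (gmax gs a) (cur.foldl max 0) cur.length := by
  induction R with
  | nil =>
    intro gs cur a
    simp [spec, gmax_append, gval]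
  | cons x R ih =>
    intro gs cur a
    simp only [List.foldl_cons, altStep, spec]
    by_cases hx : x = 0
    · simp only [hx, beq_self_eq_true, if_true]
      rw [ih (gs ++ [cur]) [] a]
      have : gmax (gs ++ [cur]) a = max (gmax gs a) (gval cur) := gmax_append gs cur a
      simp [this, gval]
    · simp only [beq_iff_eq, hx, if_false]
      rw [ih gs (cur ++ [x]) a]
      simp [List.foldl_append]

-- ===== VERDICT (by name: the statement is the Claim_ definition above) =====
theorem solution_spec : Claim_equal_solution := by
  intro R _
  show solution R = solution_alt R
  unfold solution solution_alt
  rw [A_eq_spec R 0 0 0]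
  rw [filter_map_fold _ 0 le_rfl]
  have h := B_eq_spec R [] [] 0
  simp only [gmax, List.foldl] at h
  simpa [gmax] using h.symm
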